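-- pv_equiv track=rewrite | github.com/bharadwajvyadavalli/coding_markdowns | advanced_algorithms_complete.py | minimum_area_rectangle
-- ===== SOURCE A (Python) =====
-- from typing import List, Dict, Set, Tuple, Optional
--
-- def minimum_area_rectangle(points: List[List[int]]) -> int:
--     """
--     Minimum Area Rectangle Problem
--
--     Find the minimum area of a rectangle that can be formed by any four points
--     from the given list of points.
--
--     Args:
--         points: List of [x, y] coordinates
--
--     Returns:
--         Minimum area of a rectangle, or 0 if no rectangle can be formed
--
--     Time Complexity: O(N^2) where N is the number of points
--     Space Complexity: O(N) for storing points in a set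
--     """
--     if len(points) < 4:
--         return 0
--
--     # Convert points to set for O(1) lookup
--     point_set = set()
--     for x, y in points:
--         point_set.add((x, y))
--
--     min_area = float('inf')
--
--     # Try all pairs of points as diagonal corners
--     for i in range(len(points)):
--         for j in range(i + 1, len(points)):
--             x1, y1 = points[i]
--             x2, y2 = points[j]
--
--             # Check if these points can form diagonal corners of a rectangle
--             if x1 != x2 and y1 != y2:
--                 # Check if the other two corners exist
--                 if (x1, y2) in point_set and (x2, y1) in point_set:
--                     area = abs((x2 - x1) * (y2 - y1))
--                     min_area = min(min_area, area)
--
--     return min_area if min_area != float('inf') else 0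
-- ===== SOURCE B (Python) =====
-- def minimum_area_rectangle(points):
--     if len(points) < 4:
--         return 0
--     # group distinct y-values per x-column
--     cols = {}
--     for x, y in points:
--         cols.setdefault(x, set()).add(y)
--     best = None
--     last = {}  # (y_lo, y_hi) -> most recent column x containing both
--     for x in sorted(cols):
--         ys = sorted(cols[x])
--         for i in range(len(ys)):
--             for j in range(i + 1, len(ys)):
--                 key = (ys[i], ys[j])
--                 if key in last:
--                     area = (x - last[key]) * (ys[j] - ys[i])
--                     if best is None or area < best:
--                         best = area
--                 last[key] = x
--     return best if best is not None else 0
-- ===== Notes on version B (the rewrite author's own statement) =====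
-- stated objective: faster
-- what changed: Instead of testing every pair of input points as diagonal corners against a point set, B groups distinct y-values by x-column, sweeps columns in increasing x order, and keeps a dict mapping each y-pair to the most recent column containing it, so only the closest previous column is considered per y-pair.
import Mathlib
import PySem

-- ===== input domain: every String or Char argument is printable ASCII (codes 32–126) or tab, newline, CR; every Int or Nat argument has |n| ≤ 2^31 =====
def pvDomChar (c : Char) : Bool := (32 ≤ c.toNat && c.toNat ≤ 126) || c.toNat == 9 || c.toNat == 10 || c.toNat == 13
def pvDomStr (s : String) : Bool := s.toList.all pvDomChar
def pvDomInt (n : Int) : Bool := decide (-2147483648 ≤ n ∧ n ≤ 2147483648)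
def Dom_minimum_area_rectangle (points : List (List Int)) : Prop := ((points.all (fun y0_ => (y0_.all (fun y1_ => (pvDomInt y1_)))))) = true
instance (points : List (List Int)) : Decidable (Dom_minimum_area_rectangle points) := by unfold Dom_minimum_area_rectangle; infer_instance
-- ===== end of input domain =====

-- B replaces A's all-pairs diagonal scan by a sorted column sweep keeping, per y-pair, the last column containing it.

-- ===== PORT A =====
-- 'x, y = p' unpacking; exact whenever p is a two-element list (guaranteed by Pre_ for every p A unpacks)
def pvXY (p : List Int) : Int × Int := (p.headD 0, (p.drop 1).headD 0)

def minimum_area_rectangle (points : List (List Int)) : Int :=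
  if points.length < 4 then 0 else
    let point_set : PySem.Set (Int × Int) :=
      points.foldl (fun s p => PySem.Set.add s (pvXY p)) PySem.Set.empty
    let n : Int := points.length
    let min_area : Option Int :=          -- none plays float('inf')
      (PySem.List.pyRange 0 n 1).foldl (fun acc i =>
        (PySem.List.pyRange (i+1) n 1).foldl (fun acc j =>
          let q := pvXY (PySem.List.pyGetD points i [])
          let r := pvXY (PySem.List.pyGetD points j [])
          if q.1 ≠ r.1 ∧ q.2 ≠ r.2 then
            if PySem.Set.contains point_set (q.1, r.2) ∧ PySem.Set.contains point_set (r.1, q.2) then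
              let area := |(r.1 - q.1) * (r.2 - q.2)|
              some (match acc with | none => area | some m => min m area)
            else acc
          else acc) acc) none
    match min_area with | some m => m | none => 0

-- ===== PORT B =====
-- B-side helper: one iteration of the inner pair loop (yi = ys[i], yj = ys[j])
def pvF (x : Int) (s : Option Int × PySem.Dict (Int × Int) Int) (yi yj : Int) :
    Option Int × PySem.Dict (Int × Int) Int :=
  let best :=
    match s.2.get? (yi, yj) with
    | some lx =>
      let area := (x - lx) * (yj - yi)
      match s.1 with
      | none => some area
      | some b => if area < b then some area else some b
    | none => s.1
  (best, s.2.insert (yi, yj) x)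

-- B-side helper: the double loop over index pairs i < j of a column's sorted ys
def pvColLoop (x : Int) (ys : List Int) (s : Option Int × PySem.Dict (Int × Int) Int) :
    Option Int × PySem.Dict (Int × Int) Int :=
  (PySem.List.pyRange 0 ys.length 1).foldl (fun s i =>
    (PySem.List.pyRange (i+1) ys.length 1).foldl (fun s j =>
      pvF x s (PySem.List.pyGetD ys i 0) (PySem.List.pyGetD ys j 0)) s) s

def minimum_area_rectangle_alt (points : List (List Int)) : Int :=
  if points.length < 4 then 0 else
    let cols : PySem.Dict Int (PySem.Set Int) :=
      points.foldl (fun d p => d.modify (pvXY p).1 PySem.Set.empty (fun s => PySem.Set.add s (pvXY p).2)) PySem.Dict.empty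
    let r :=
      (PySem.List.sorted cols.keys (fun k => k) false).foldl
        (fun s x => pvColLoop x (PySem.List.sorted (cols.getD x PySem.Set.empty) (fun y => y) false) s)
        (none, PySem.Dict.empty)
    match r.1 with | some b => b | none => 0

-- ===== PRECONDITION & SPEC =====
-- Pre_ excludes only inputs on which A raises: with 4 or more points, every point must be a
-- two-element list, or A's tuple unpacking raises ValueError.
def Pre_minimum_area_rectangle (points : List (List Int)) : Prop :=
  points.length < 4 ∨ ∀ p ∈ points, p.length = 2
instance (points : List (List Int)) : Decidable (Pre_minimum_area_rectangle points) := by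
  unfold Pre_minimum_area_rectangle; infer_instance
def pvWitness_minimum_area_rectangle : List (List Int) := [[0,0],[0,1],[1,0],[1,1]]

def Spec_minimum_area_rectangle (points : List (List Int)) (out : Int) : Prop := out = minimum_area_rectangle_alt points
instance (points : List (List Int)) (out : Int) : Decidable (Spec_minimum_area_rectangle points out) := by unfold Spec_minimum_area_rectangle; infer_instance

-- ===== CLAIM (what is proved, stated in full; the proofs are below) =====
def Claim_equal_minimum_area_rectangle : Prop := ∀ (points : List (List Int)), Dom_minimum_area_rectangle points → Pre_minimum_area_rectangle points → Spec_minimum_area_rectangle points (minimum_area_rectangle points)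

-- ===== LEMMAS AND PROOFS =====

-- the list of (x, y) pairs A and B both work on
def pvP (points : List (List Int)) : List (Int × Int) := points.map pvXY

-- "a is the area of some axis-aligned rectangle with all four corners in P" (A's orientation-free form)
def pvRect (P : List (Int × Int)) (a : Int) : Prop :=
  ∃ q r : Int × Int, q ∈ P ∧ r ∈ P ∧ q.1 ≠ r.1 ∧ q.2 ≠ r.2 ∧ (q.1, r.2) ∈ P ∧ (r.1, q.2) ∈ P ∧ a = |(r.1 - q.1) * (r.2 - q.2)|

-- canonical form restricted to left/right columns drawn from 'pre'
def pvCR (P : List (Int × Int)) (pre : List Int) (a : Int) : Prop :=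
  ∃ x1 x2 y1 y2 : Int, x1 ∈ pre ∧ x2 ∈ pre ∧ x1 < x2 ∧ y1 < y2 ∧ (x1,y1) ∈ P ∧ (x1,y2) ∈ P ∧ (x2,y1) ∈ P ∧ (x2,y2) ∈ P ∧ a = (x2-x1)*(y2-y1)

-- "r is the minimum of Q, or 0 when Q is empty"
def pvIsMin0 (Q : Int → Prop) (r : Int) : Prop :=
  (r = 0 ∧ ∀ a, ¬ Q a) ∨ (Q r ∧ ∀ a, Q a → r ≤ a)

-- ordered index pairs i < j of a list, as element pairs
def pvPairs {α : Type} : List α → List (α × α)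
  | [] => []
  | y :: t => t.map (fun z => (y, z)) ++ pvPairs t

theorem pvPairs_mem_fst {α : Type} {l : List α} {k : α × α} (h : k ∈ pvPairs l) : k.1 ∈ l ∧ k.2 ∈ l := by
  induction l with
  | nil => simp [pvPairs] at h
  | cons y t ih =>
    simp only [pvPairs, List.mem_append, List.mem_map] at h
    rcases h with ⟨z, hz, rfl⟩ | h
    · exact ⟨List.mem_cons_self, List.mem_cons_of_mem _ hz⟩
    · exact ⟨List.mem_cons_of_mem _ (ih h).1, List.mem_cons_of_mem _ (ih h).2⟩

theorem pvPairs_cover {α : Type} {l : List α} {q r : α} (hq : q ∈ l) (hr : r ∈ l) (hne : q ≠ r) :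
    (q, r) ∈ pvPairs l ∨ (r, q) ∈ pvPairs l := by
  induction l with
  | nil => simp at hq
  | cons y t ih =>
    rcases List.mem_cons.1 hq with rfl | hq'
    · rcases List.mem_cons.1 hr with rfl | hr'
      · exact absurd rfl hne
      · refine Or.inl ?_
        simp only [pvPairs, List.mem_append, List.mem_map]
        exact Or.inl ⟨r, hr', rfl⟩
    · rcases List.mem_cons.1 hr with rfl | hr'
      · refine Or.inr ?_
        simp only [pvPairs, List.mem_append, List.mem_map]
        exact Or.inl ⟨q, hq', rfl⟩
      · rcases ih hq' hr' with h | h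
        · exact Or.inl (by simp only [pvPairs, List.mem_append]; exact Or.inr h)
        · exact Or.inr (by simp only [pvPairs, List.mem_append]; exact Or.inr h)

theorem pvPairs_lt {l : List Int} (hs : l.Pairwise (· < ·)) (a b : Int) :
    (a, b) ∈ pvPairs l ↔ a ∈ l ∧ b ∈ l ∧ a < b := by
  induction l with
  | nil => simp [pvPairs]
  | cons y t ih =>
    have hyt : ∀ z ∈ t, y < z := fun z hz => (List.pairwise_cons.1 hs).1 z hz
    have ht : t.Pairwise (· < ·) := (List.pairwise_cons.1 hs).2
    constructor
    · intro h
      simp only [pvPairs, List.mem_append, List.mem_map] at h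
      rcases h with ⟨z, hz, hzz⟩ | h
      · rcases Prod.mk.injEq y z a b ▸ hzz with ⟨rfl, rfl⟩
        exact ⟨List.mem_cons_self, List.mem_cons_of_mem _ hz, hyt _ hz⟩
      · have := (ih ht).1 h
        exact ⟨List.mem_cons_of_mem _ this.1, List.mem_cons_of_mem _ this.2.1, this.2.2⟩
    · rintro ⟨ha, hb, hab⟩
      rcases List.mem_cons.1 ha with rfl | ha'
      · have hb' : b ∈ t := by
          rcases List.mem_cons.1 hb with rfl | hb'
          · exact absurd hab (lt_irrefl _)
          · exact hb'
        simp only [pvPairs, List.mem_append, List.mem_map]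
        exact Or.inl ⟨b, hb', rfl⟩
      · have hb' : b ∈ t := by
          rcases List.mem_cons.1 hb with rfl | hb'
          · exact absurd (lt_trans (hyt a ha') hab) (lt_irrefl _)
          · exact hb'
        simp only [pvPairs, List.mem_append, List.mem_map]
        exact Or.inr ((ih ht).2 ⟨ha', hb', hab⟩)

theorem pvPairs_nodup {l : List Int} (hs : l.Pairwise (· < ·)) : (pvPairs l).Nodup := by
  induction l with
  | nil => simp [pvPairs]
  | cons y t ih =>
    have hyt : ∀ z ∈ t, y < z := fun z hz => (List.pairwise_cons.1 hs).1 z hz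
    have ht : t.Pairwise (· < ·) := (List.pairwise_cons.1 hs).2
    have hnt : t.Nodup := ht.imp (fun h => ne_of_lt h)
    refine List.Nodup.append ?_ (ih ht) ?_
    · exact hnt.map (fun a b h => (Prod.mk.injEq _ _ _ _ ▸ h).2)
    · intro k hk1 hk2
      simp only [List.mem_map] at hk1
      obtain ⟨z, hz, rfl⟩ := hk1
      have : (y, z).1 ∈ t := (pvPairs_mem_fst hk2).1
      exact absurd (hyt y this) (lt_irrefl _)

-- a double fold over index pairs i < j is a fold over pvPairs
theorem pvDouble_pair_fold {σ α : Type} (F : σ → α → α → σ) (d : α) (l : List α) (s : σ) :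
    (PySem.List.pyRange 0 l.length 1).foldl (fun s i =>
      (PySem.List.pyRange (i+1) l.length 1).foldl (fun s j =>
        F s (PySem.List.pyGetD l i d) (PySem.List.pyGetD l j d)) s) s
    = (pvPairs l).foldl (fun s k => F s k.1 k.2) s := by
  have key : ∀ (t : List α) (s : σ),
      (PySem.List.pyRange 0 t.length 1).foldl (fun s i =>
        (t.drop (i.toNat+1)).foldl (fun s z => F s (PySem.List.pyGetD t i d) z) s) s
      = (pvPairs t).foldl (fun s k => F s k.1 k.2) s := by
    intro t
    induction t with
    | nil => intro s; simp [PySem.List.pyRange_one_eq_nil, pvPairs]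
    | cons y t ih =>
      intro s
      have hlen : ((y :: t).length : Int) = (t.length : Int) + 1 := by push_cast [List.length_cons]; ring
      rw [hlen, PySem.List.pyRange_one_cons (by positivity)]
      rw [List.foldl_cons]
      have h0 : ((y :: t).drop ((0:Int).toNat+1)).foldl (fun s z => F s (PySem.List.pyGetD (y :: t) 0 d) z) s
          = (t.map (fun z => (y, z))).foldl (fun s k => F s k.1 k.2) s := by
        simp [PySem.List.pyGetD_zero_cons, List.foldl_map]
      rw [h0]
      have hr : PySem.List.pyRange (0+1) ((t.length : Int)+1) 1
          = (PySem.List.pyRange 0 (t.length : Int) 1).map (fun k => k + 1) := by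
        rw [PySem.List.pyRange_one, PySem.List.pyRange_one]
        have e : ((t.length : Int) + 1 - (0 + 1)) = (t.length : Int) := by ring
        rw [e]
        simp only [Int.sub_zero, List.map_map]
        refine List.map_congr_left (fun k _ => ?_)
        simp only [Function.comp_apply]
        ring
      rw [hr, List.foldl_map]
      have hcong : ∀ (s : σ) (i : Int), i ∈ PySem.List.pyRange 0 (t.length : Int) 1 →
          ((y :: t).drop ((i+1).toNat+1)).foldl (fun s z => F s (PySem.List.pyGetD (y :: t) (i+1) d) z) s
          = (t.drop (i.toNat+1)).foldl (fun s z => F s (PySem.List.pyGetD t i d) z) s := by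
        intro s i hi
        have hi0 : 0 ≤ i := (PySem.List.mem_pyRange_one.1 hi).1
        have h1 : (i+1).toNat + 1 = (i.toNat + 1) + 1 := by omega
        have h2 : PySem.List.pyGetD (y :: t) (i+1) d = PySem.List.pyGetD t i d := by
          conv_rhs => rw [show i = ((i.toNat : Nat) : Int) from by omega, PySem.List.pyGetD_natCast]
          rw [show i + 1 = ((i.toNat + 1 : Nat) : Int) from by omega, PySem.List.pyGetD_natCast,
            List.getD_cons_succ]
        rw [h1, h2, List.drop_succ_cons]
      have step := PySem.List.foldl_congr_mem (PySem.List.pyRange 0 (t.length : Int) 1)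
        (fun (s : σ) (i : Int) => ((y :: t).drop ((i+1).toNat+1)).foldl (fun s z => F s (PySem.List.pyGetD (y :: t) (i+1) d) z) s)
        (fun (s : σ) (i : Int) => (t.drop (i.toNat+1)).foldl (fun s z => F s (PySem.List.pyGetD t i d) z) s)
        (List.foldl (fun s k => F s k.1 k.2) s (t.map (fun z => (y, z))))
        hcong
      refine Eq.trans step ?_
      rw [ih]
      simp only [pvPairs]
      rw [List.foldl_append]
  have conv : ∀ (s : σ),
      (PySem.List.pyRange 0 l.length 1).foldl (fun s i =>
        (PySem.List.pyRange (i+1) l.length 1).foldl (fun s j =>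
          F s (PySem.List.pyGetD l i d) (PySem.List.pyGetD l j d)) s) s
      = (PySem.List.pyRange 0 l.length 1).foldl (fun s i =>
        (l.drop (i.toNat+1)).foldl (fun s z => F s (PySem.List.pyGetD l i d) z) s) s := by
    intro s
    refine PySem.List.foldl_congr_mem _ _ _ _ (fun s i hi => ?_)
    have hi0 : 0 ≤ i := (PySem.List.mem_pyRange_one.1 hi).1
    have h := PySem.List.foldl_pyRange_pyGetD (xs := l) (d := d)
      (f := fun s z => F s (PySem.List.pyGetD l i d) z) (init := s) (a := i+1) (by omega)
    have e : (i+1).toNat = i.toNat + 1 := by omega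
    rw [← e]
    simpa using h
  rw [conv, key]

-- running minimum with an Option accumulator (none = +inf)
theorem pvOminFold {α : Type} (C : α → Prop) [DecidablePred C] (f : α → Int) (l : List α) (b : Option Int) :
    (((l.foldl (fun acc k => if C k then some (match acc with | none => f k | some m => min m (f k)) else acc) b) = none
      ↔ (b = none ∧ ∀ k ∈ l, ¬ C k))
    ∧ (∀ m, (l.foldl (fun acc k => if C k then some (match acc with | none => f k | some m => min m (f k)) else acc) b) = some m →
        ((b = some m ∨ ∃ k ∈ l, C k ∧ f k = m) ∧ (∀ v, b = some v → m ≤ v) ∧ ∀ k ∈ l, C k → m ≤ f k))) := by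
  induction l generalizing b with
  | nil =>
    constructor
    · simp
    · intro m hm
      subst hm
      refine ⟨Or.inl rfl, ?_, by simp⟩
      intro v hv
      exact le_of_eq (Option.some.inj hv)
  | cons k0 t ih =>
    simp only [List.foldl_cons]
    by_cases hc : C k0
    · rw [if_pos hc]
      rcases b with _ | v0
      · refine ⟨?_, ?_⟩
        · constructor
          · intro h
            exact absurd ((ih (some (f k0))).1.1 h).1 (by simp)
          · rintro ⟨-, hall⟩; exact absurd hc (hall k0 List.mem_cons_self)
        · intro m hm
          obtain ⟨hach, hlb, hall⟩ := (ih (some (f k0))).2 m hm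
          refine ⟨?_, ?_, ?_⟩
          · rcases hach with h | ⟨k, hk, hCk, hfk⟩
            · exact Or.inr ⟨k0, List.mem_cons_self, hc, (Option.some.injEq _ _ ▸ h).symm ▸ rfl⟩
            · exact Or.inr ⟨k, List.mem_cons_of_mem _ hk, hCk, hfk⟩
          · intro v hv; exact absurd hv (by simp)
          · intro k hk hCk
            rcases List.mem_cons.1 hk with rfl | hk'
            · exact hlb _ rfl
            · exact hall k hk' hCk
      · refine ⟨?_, ?_⟩
        · constructor
          · intro h
            exact absurd ((ih _).1.1 h).1 (by simp)
          · rintro ⟨-, hall⟩; exact absurd hc (hall k0 List.mem_cons_self)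
        · intro m hm
          obtain ⟨hach, hlb, hall⟩ := (ih (some (min v0 (f k0)))).2 m hm
          have hmv : m ≤ min v0 (f k0) := by
            rcases hach with h | _
            · exact le_of_eq (Option.some.injEq _ _ ▸ h).symm
            · exact hlb _ rfl
          refine ⟨?_, ?_, ?_⟩
          · rcases hach with h | ⟨k, hk, hCk, hfk⟩
            · have h' := (Option.some.injEq _ _ ▸ h)
              rcases le_total v0 (f k0) with hle | hle
              · exact Or.inl (by rw [← h', min_eq_left hle])
              · exact Or.inr ⟨k0, List.mem_cons_self, hc, by rw [← h', min_eq_right hle]⟩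
            · exact Or.inr ⟨k, List.mem_cons_of_mem _ hk, hCk, hfk⟩
          · intro v hv
            rw [Option.some.injEq] at hv
            exact hv ▸ le_trans hmv (min_le_left _ _)
          · intro k hk hCk
            rcases List.mem_cons.1 hk with rfl | hk'
            · exact le_trans hmv (min_le_right _ _)
            · exact hall k hk' hCk
    · rw [if_neg hc]
      refine ⟨?_, ?_⟩
      · constructor
        · intro h
          obtain ⟨hb, hall⟩ := (ih b).1.1 h
          refine ⟨hb, ?_⟩
          intro k hk
          rcases List.mem_cons.1 hk with rfl | hk'
          · exact hc
          · exact hall k hk'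
        · rintro ⟨hb, hall⟩
          exact (ih b).1.2 ⟨hb, fun k hk => hall k (List.mem_cons_of_mem _ hk)⟩
      · intro m hm
        obtain ⟨hach, hlb, hall⟩ := (ih b).2 m hm
        refine ⟨?_, hlb, ?_⟩
        · rcases hach with h | ⟨k, hk, hCk, hfk⟩
          · exact Or.inl h
          · exact Or.inr ⟨k, List.mem_cons_of_mem _ hk, hCk, hfk⟩
        · intro k hk hCk
          rcases List.mem_cons.1 hk with rfl | hk'
          · exact absurd hCk hc
          · exact hall k hk' hCk

theorem pvIsMin0_unique {Q : Int → Prop} {r r' : Int}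
    (h : pvIsMin0 Q r) (h' : pvIsMin0 Q r') : r = r' := by
  rcases h with ⟨rfl, he⟩ | ⟨hq, hlb⟩
  · rcases h' with ⟨rfl, _⟩ | ⟨hq', _⟩
    · rfl
    · exact absurd hq' (he r')
  · rcases h' with ⟨rfl, he'⟩ | ⟨hq', hlb'⟩
    · exact absurd hq (he' r)
    · exact le_antisymm (hlb _ hq') (hlb' _ hq)

theorem pvA_isMin0 (points : List (List Int)) (h4 : ¬ points.length < 4) :
    pvIsMin0 (pvRect (pvP points)) (minimum_area_rectangle points) := by
  have hset : (points.foldl (fun s p => PySem.Set.add s (pvXY p)) PySem.Set.empty)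
      = PySem.Set.ofList (pvP points) := by
    rw [PySem.Set.ofList_eq_foldl, pvP, List.foldl_map]
    rfl
  simp only [minimum_area_rectangle, if_neg h4, hset]
  rw [pvDouble_pair_fold
    (F := fun (acc : Option Int) (p p' : List Int) =>
      if (pvXY p).1 ≠ (pvXY p').1 ∧ (pvXY p).2 ≠ (pvXY p').2 then
        if PySem.Set.contains (PySem.Set.ofList (pvP points)) ((pvXY p).1, (pvXY p').2)
            ∧ PySem.Set.contains (PySem.Set.ofList (pvP points)) ((pvXY p').1, (pvXY p).2) then
          some (match acc with
            | none => |((pvXY p').1 - (pvXY p).1) * ((pvXY p').2 - (pvXY p).2)|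
            | some m => min m |((pvXY p').1 - (pvXY p).1) * ((pvXY p').2 - (pvXY p).2)|)
        else acc
      else acc)
    (d := ([] : List Int))]
  have hcanon := PySem.List.foldl_congr_mem (pvPairs points)
    (fun (acc : Option Int) (k : List Int × List Int) =>
      if (pvXY k.1).1 ≠ (pvXY k.2).1 ∧ (pvXY k.1).2 ≠ (pvXY k.2).2 then
        if PySem.Set.contains (PySem.Set.ofList (pvP points)) ((pvXY k.1).1, (pvXY k.2).2)
            ∧ PySem.Set.contains (PySem.Set.ofList (pvP points)) ((pvXY k.2).1, (pvXY k.1).2) then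
          some (match acc with
            | none => |((pvXY k.2).1 - (pvXY k.1).1) * ((pvXY k.2).2 - (pvXY k.1).2)|
            | some m => min m |((pvXY k.2).1 - (pvXY k.1).1) * ((pvXY k.2).2 - (pvXY k.1).2)|)
        else acc
      else acc)
    (fun (acc : Option Int) (k : List Int × List Int) =>
      if ((pvXY k.1).1 ≠ (pvXY k.2).1 ∧ (pvXY k.1).2 ≠ (pvXY k.2).2)
          ∧ ((pvXY k.1).1, (pvXY k.2).2) ∈ pvP points ∧ ((pvXY k.2).1, (pvXY k.1).2) ∈ pvP points then
        some (match acc with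
          | none => |((pvXY k.2).1 - (pvXY k.1).1) * ((pvXY k.2).2 - (pvXY k.1).2)|
          | some m => min m |((pvXY k.2).1 - (pvXY k.1).1) * ((pvXY k.2).2 - (pvXY k.1).2)|)
      else acc)
    none
    (by
      intro acc k _
      dsimp only
      by_cases h1 : (pvXY k.1).1 ≠ (pvXY k.2).1 ∧ (pvXY k.1).2 ≠ (pvXY k.2).2
      · rw [if_pos h1]
        by_cases h2 : ((pvXY k.1).1, (pvXY k.2).2) ∈ pvP points ∧ ((pvXY k.2).1, (pvXY k.1).2) ∈ pvP points
        · rw [if_pos ⟨(PySem.Set.contains_iff _ _).2 ((PySem.Set.mem_ofList _ _).2 h2.1),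
              (PySem.Set.contains_iff _ _).2 ((PySem.Set.mem_ofList _ _).2 h2.2)⟩, if_pos ⟨h1, h2⟩]
        · rw [if_neg (fun hcc => h2 ⟨(PySem.Set.mem_ofList _ _).1 ((PySem.Set.contains_iff _ _).1 hcc.1),
              (PySem.Set.mem_ofList _ _).1 ((PySem.Set.contains_iff _ _).1 hcc.2)⟩),
            if_neg (fun hh => h2 hh.2)]
      · rw [if_neg h1, if_neg (fun hh => h1 hh.1)])
  rw [hcanon]
  have hchar := pvOminFold
    (C := fun (k : List Int × List Int) =>
      ((pvXY k.1).1 ≠ (pvXY k.2).1 ∧ (pvXY k.1).2 ≠ (pvXY k.2).2)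
        ∧ ((pvXY k.1).1, (pvXY k.2).2) ∈ pvP points ∧ ((pvXY k.2).1, (pvXY k.1).2) ∈ pvP points)
    (f := fun (k : List Int × List Int) => |((pvXY k.2).1 - (pvXY k.1).1) * ((pvXY k.2).2 - (pvXY k.1).2)|)
    (pvPairs points) none
  -- candidate ↔ rectangle, both directions
  have cand_rect : ∀ k ∈ pvPairs points,
      (((pvXY k.1).1 ≠ (pvXY k.2).1 ∧ (pvXY k.1).2 ≠ (pvXY k.2).2)
        ∧ ((pvXY k.1).1, (pvXY k.2).2) ∈ pvP points ∧ ((pvXY k.2).1, (pvXY k.1).2) ∈ pvP points) →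
      pvRect (pvP points) |((pvXY k.2).1 - (pvXY k.1).1) * ((pvXY k.2).2 - (pvXY k.1).2)| := by
    intro k hk ⟨⟨hx, hy⟩, hm1, hm2⟩
    obtain ⟨h1, h2⟩ := pvPairs_mem_fst hk
    exact ⟨pvXY k.1, pvXY k.2, List.mem_map_of_mem h1, List.mem_map_of_mem h2, hx, hy, hm1, hm2, rfl⟩
  have rect_cand : ∀ a, pvRect (pvP points) a → ∃ k ∈ pvPairs points,
      (((pvXY k.1).1 ≠ (pvXY k.2).1 ∧ (pvXY k.1).2 ≠ (pvXY k.2).2)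
        ∧ ((pvXY k.1).1, (pvXY k.2).2) ∈ pvP points ∧ ((pvXY k.2).1, (pvXY k.1).2) ∈ pvP points)
      ∧ |((pvXY k.2).1 - (pvXY k.1).1) * ((pvXY k.2).2 - (pvXY k.1).2)| = a := by
    rintro a ⟨q, r, hq, hr, hx, hy, hm1, hm2, rfl⟩
    obtain ⟨p, hp, hpq⟩ := List.mem_map.1 hq
    obtain ⟨p', hp', hpr⟩ := List.mem_map.1 hr
    have hne : p ≠ p' := by
      intro h; rw [h, hpr] at hpq; exact hx (by rw [hpq])
    rcases pvPairs_cover hp hp' hne with h | h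
    · exact ⟨(p, p'), h, ⟨⟨by simp [hpq, hpr]; exact hx, by simp [hpq, hpr]; exact hy⟩,
        by simp [hpq, hpr]; exact hm1, by simp [hpq, hpr]; exact hm2⟩, by simp [hpq, hpr]⟩
    · refine ⟨(p', p), h, ⟨⟨by simp [hpq, hpr]; exact fun hh => hx hh.symm,
        by simp [hpq, hpr]; exact fun hh => hy hh.symm⟩,
        by simp [hpq, hpr]; exact hm2, by simp [hpq, hpr]; exact hm1⟩, ?_⟩
      simp only [hpq, hpr]
      rw [show (q.1 - r.1) * (q.2 - r.2) = (r.1 - q.1) * (r.2 - q.2) by ring]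
  -- now case on the fold result
  rcases hres : (pvPairs points).foldl _ none with _ | m
  · obtain ⟨-, hall⟩ := hchar.1.1 hres
    exact Or.inl ⟨rfl, fun a ha => by
      obtain ⟨k, hk, hC, -⟩ := rect_cand a ha
      exact hall k hk hC⟩
  · obtain ⟨hach, -, hall⟩ := hchar.2 m hres
    have hQ : pvRect (pvP points) m := by
      rcases hach with h | ⟨k, hk, hC, hf⟩
      · exact absurd h (by simp)
      · exact hf ▸ cand_rect k hk hC
    exact Or.inr ⟨hQ, fun a ha => by
      obtain ⟨k, hk, hC, hf⟩ := rect_cand a ha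
      exact hf ▸ hall k hk hC⟩

-- the column dictionary B builds, as a named definition (identical expression to the port's)
def pvCols (points : List (List Int)) : PySem.Dict Int (PySem.Set Int) :=
  points.foldl (fun d p => d.modify (pvXY p).1 PySem.Set.empty (fun s => PySem.Set.add s (pvXY p).2)) PySem.Dict.empty

theorem pvCols_getD_aux (l : List (Int × Int)) :
    ∀ (d : PySem.Dict Int (PySem.Set Int)) (x y : Int),
      (y ∈ (l.foldl (fun d q => d.modify q.1 PySem.Set.empty (fun s => PySem.Set.add s q.2)) d).getD x PySem.Set.empty
        ↔ y ∈ d.getD x PySem.Set.empty ∨ (x, y) ∈ l)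
      ∧ ((∀ z, (d.getD z PySem.Set.empty).Nodup) →
          ((l.foldl (fun d q => d.modify q.1 PySem.Set.empty (fun s => PySem.Set.add s q.2)) d).getD x PySem.Set.empty).Nodup) := by
  induction l with
  | nil => intro d x y; exact ⟨by simp, fun h => h x⟩
  | cons q l ih =>
    intro d x y
    rw [List.foldl_cons]
    constructor
    · rw [(ih _ x y).1]
      rw [PySem.Dict.getD_modify]
      by_cases hx : x = q.1
      · subst hx
        rw [if_pos rfl, PySem.Set.mem_add]
        constructor
        · rintro (⟨h | rfl⟩ | h)
          · exact Or.inl h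
          · exact Or.inr (List.mem_cons_self)
          · exact Or.inr (List.mem_cons_of_mem _ h)
        · rintro (h | h)
          · exact Or.inl (Or.inl h)
          · rcases List.mem_cons.1 h with h' | h'
            · have : y = q.2 := congrArg Prod.snd h'
              exact Or.inl (Or.inr this)
            · exact Or.inr h'
      · rw [if_neg hx]
        constructor
        · rintro (h | h)
          · exact Or.inl h
          · exact Or.inr (List.mem_cons_of_mem _ h)
        · rintro (h | h)
          · exact Or.inl h
          · rcases List.mem_cons.1 h with h' | h'
            · exact absurd (congrArg Prod.fst h') hx
            · exact Or.inr h'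
    · intro hnd
      refine (ih _ x y).2 ?_
      intro z
      rw [PySem.Dict.getD_modify]
      by_cases hz : z = q.1
      · rw [if_pos hz]; exact PySem.Set.nodup_add _ _ (hnd q.1)
      · rw [if_neg hz]; exact hnd z

theorem pvCols_eq (points : List (List Int)) :
    pvCols points = (pvP points).foldl (fun d q => d.modify q.1 PySem.Set.empty (fun s => PySem.Set.add s q.2)) PySem.Dict.empty := by
  rw [pvCols, pvP, List.foldl_map]

theorem pvCols_getD_mem (points : List (List Int)) (x y : Int) :
    y ∈ (pvCols points).getD x PySem.Set.empty ↔ (x, y) ∈ pvP points := by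
  rw [pvCols_eq, (pvCols_getD_aux (pvP points) PySem.Dict.empty x y).1]
  simp [PySem.Dict.getD_empty]

theorem pvCols_getD_nodup (points : List (List Int)) (x : Int) :
    ((pvCols points).getD x PySem.Set.empty).Nodup := by
  rw [pvCols_eq]
  exact (pvCols_getD_aux (pvP points) PySem.Dict.empty x 0).2 (fun z => by simp [PySem.Dict.getD_empty])

theorem pvCols_keys_mem (points : List (List Int)) (x : Int) :
    x ∈ (pvCols points).keys ↔ ∃ y, (x, y) ∈ pvP points := by
  rw [pvCols]
  rw [PySem.Dict.keys_foldl_modify_key points (fun p => (pvXY p).1) PySem.Set.empty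
    (fun _ p => fun s => PySem.Set.add s (pvXY p).2) PySem.Dict.empty]
  rw [PySem.Dict.keys_empty, PySem.Set.update_nil_left, PySem.Set.mem_ofList]
  constructor
  · intro h
    obtain ⟨p, hp, rfl⟩ := List.mem_map.1 h
    exact ⟨(pvXY p).2, List.mem_map_of_mem hp⟩
  · rintro ⟨y, hy⟩
    obtain ⟨p, hp, he⟩ := List.mem_map.1 hy
    exact List.mem_map.2 ⟨p, hp, congrArg Prod.fst he⟩

theorem pvCols_keys_nodup (points : List (List Int)) : (pvCols points).keys.Nodup := by
  rw [pvCols]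
  exact PySem.Dict.nodup_keys_foldl_modify_key points (fun p => (pvXY p).1) PySem.Set.empty
    (fun _ p => fun s => PySem.Set.add s (pvXY p).2) PySem.Dict.empty (by simp [PySem.Dict.keys_empty])

theorem pvPairwise_lt_of_le_nodup {l : List Int} (hle : l.Pairwise (· ≤ ·)) (hnd : l.Nodup) :
    l.Pairwise (· < ·) :=
  (hle.and hnd).imp (fun h => lt_of_le_of_ne h.1 h.2)

-- B's inner per-column loop body, as a named function
def pvG (x : Int) (s : Option Int × PySem.Dict (Int × Int) Int) (k : Int × Int) :
    Option Int × PySem.Dict (Int × Int) Int :=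
  (match s.2.get? k with
   | some lx =>
     let area := (x - lx) * (k.2 - k.1)
     match s.1 with
     | none => some area
     | some b => if area < b then some area else some b
   | none => s.1,
   s.2.insert k x)

theorem pvColFold (x : Int) (K : List (Int × Int)) (hK : K.Nodup) :
    ∀ (b0 : Option Int) (d0 : PySem.Dict (Int × Int) Int),
      (∀ k', (K.foldl (pvG x) (b0, d0)).2.get? k' = if k' ∈ K then some x else d0.get? k')
      ∧ ((K.foldl (pvG x) (b0, d0)).1 = none ↔ (b0 = none ∧ ∀ k ∈ K, d0.get? k = none))
      ∧ (∀ m, (K.foldl (pvG x) (b0, d0)).1 = some m →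
          ((b0 = some m ∨ ∃ k ∈ K, ∃ lx, d0.get? k = some lx ∧ m = (x - lx) * (k.2 - k.1))
            ∧ (∀ v, b0 = some v → m ≤ v)
            ∧ (∀ k ∈ K, ∀ lx, d0.get? k = some lx → m ≤ (x - lx) * (k.2 - k.1)))) := by
  induction K with
  | nil =>
    intro b0 d0
    refine ⟨fun k' => by simp, by simp, ?_⟩
    intro m hm
    simp only [List.foldl_nil] at hm
    subst hm
    exact ⟨Or.inl rfl, fun v hv => le_of_eq (Option.some.inj hv), by simp⟩
  | cons k0 T ih =>
    intro b0 d0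
    have hk0T : k0 ∉ T := (List.nodup_cons.1 hK).1
    have hT : T.Nodup := (List.nodup_cons.1 hK).2
    rw [List.foldl_cons]
    have hstate : pvG x (b0, d0) k0 = ((pvG x (b0, d0) k0).1, d0.insert k0 x) := rfl
    rw [hstate]
    obtain ⟨ih1, ih2, ih3⟩ := ih hT (pvG x (b0, d0) k0).1 (d0.insert k0 x)
    have hins : ∀ k ∈ T, (d0.insert k0 x).get? k = d0.get? k := by
      intro k hk
      rw [PySem.Dict.get?_insert, if_neg (fun h => hk0T (by rw [← h]; exact hk))]
    -- facts about the first-step accumulator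
    have hb1_none : (pvG x (b0, d0) k0).1 = none ↔ (b0 = none ∧ d0.get? k0 = none) := by
      simp only [pvG]
      rcases d0.get? k0 with _ | lx
      · simp
      · rcases b0 with _ | b
        · simp
        · simp only []
          split_ifs <;> simp
    have hb1_some : ∀ v, (pvG x (b0, d0) k0).1 = some v →
        ((b0 = some v ∨ ∃ lx, d0.get? k0 = some lx ∧ v = (x - lx) * (k0.2 - k0.1))
          ∧ (∀ w, b0 = some w → v ≤ w)
          ∧ (∀ lx, d0.get? k0 = some lx → v ≤ (x - lx) * (k0.2 - k0.1))) := by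
      intro v hv
      simp only [pvG] at hv
      rcases hg : d0.get? k0 with _ | lx <;> rw [hg] at hv <;> dsimp only [] at hv
      · refine ⟨Or.inl hv, fun w hw => ?_, fun lx h => by simp at h⟩
        rw [hv] at hw
        exact le_of_eq (Option.some.inj hw)
      · rcases b0 with _ | b
        · dsimp only [] at hv
          have hva : v = (x - lx) * (k0.2 - k0.1) := (Option.some.inj hv).symm
          exact ⟨Or.inr ⟨lx, rfl, hva⟩, fun w hw => by simp at hw,
            fun lx' h => by
              rw [Option.some.inj h] at hva
              exact le_of_eq hva⟩
        · dsimp only [] at hv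
          split_ifs at hv with hcmp
          · have hva : v = (x - lx) * (k0.2 - k0.1) := (Option.some.inj hv).symm
            refine ⟨Or.inr ⟨lx, rfl, hva⟩, fun w hw => ?_, fun lx' h => ?_⟩
            · rw [← Option.some.inj hw]
              exact hva ▸ le_of_lt hcmp
            · rw [Option.some.inj h] at hva
              exact le_of_eq hva
          · have hvb : v = b := (Option.some.inj hv).symm
            refine ⟨Or.inl (by rw [hvb]), fun w hw => le_of_eq (by rw [hvb, Option.some.inj hw]), fun lx' h => ?_⟩
            rw [← Option.some.inj h]
            exact hvb ▸ le_of_not_gt hcmp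
    refine ⟨?_, ?_, ?_⟩
    · intro k'
      rw [ih1 k']
      by_cases hkT : k' ∈ T
      · rw [if_pos hkT, if_pos (List.mem_cons_of_mem _ hkT)]
      · rw [if_neg hkT]
        by_cases hk0 : k' = k0
        · subst hk0
          rw [if_pos List.mem_cons_self, PySem.Dict.get?_insert, if_pos rfl]
        · rw [if_neg (fun h => by rcases List.mem_cons.1 h with h' | h' <;> [exact hk0 h'; exact hkT h']),
            PySem.Dict.get?_insert, if_neg hk0]
    · rw [ih2, hb1_none]
      constructor
      · rintro ⟨⟨hb0, hg⟩, hall⟩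
        refine ⟨hb0, ?_⟩
        intro k hk
        rcases List.mem_cons.1 hk with rfl | hk'
        · exact hg
        · rw [← hins k hk']
          exact hall k hk'
      · rintro ⟨hb0, hall⟩
        refine ⟨⟨hb0, hall k0 List.mem_cons_self⟩, ?_⟩
        intro k hk
        rw [hins k hk]
        exact hall k (List.mem_cons_of_mem _ hk)
    · intro m hm
      obtain ⟨hach, hlb, hall⟩ := ih3 m hm
      refine ⟨?_, ?_, ?_⟩
      · rcases hach with h | ⟨k, hk, lx', hlx', hm'⟩
        · rcases (hb1_some m h).1 with h' | ⟨lx, hg, hva⟩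
          · exact Or.inl h'
          · exact Or.inr ⟨k0, List.mem_cons_self, lx, hg, hva⟩
        · rw [hins k hk] at hlx'
          exact Or.inr ⟨k, List.mem_cons_of_mem _ hk, lx', hlx', hm'⟩
      · intro v hv
        rcases hb1e : (pvG x (b0, d0) k0).1 with _ | w
        · rw [(hb1_none.1 hb1e).1] at hv
          exact absurd hv (by simp)
        · exact le_trans (hlb w hb1e) ((hb1_some w hb1e).2.1 v hv)
      · intro k hk lx' hlx'
        rcases List.mem_cons.1 hk with rfl | hk'
        · rcases hb1e : (pvG x (b0, d0) k).1 with _ | w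
          · rw [(hb1_none.1 hb1e).2] at hlx'
            exact absurd hlx' (by simp)
          · exact le_trans (hlb w hb1e) ((hb1_some w hb1e).2.2 lx' hlx')
        · rw [← hins k hk'] at hlx'
          exact hall k hk' lx' hlx'

-- B's per-column step over the pair list of the column at x
def pvStepCol (colf : Int → List Int) (s : Option Int × PySem.Dict (Int × Int) Int) (x : Int) :
    Option Int × PySem.Dict (Int × Int) Int :=
  (pvPairs (colf x)).foldl (pvG x) s

-- loop invariant for the dict: it maps each y-pair to the LAST processed column containing both ys
def pvINVd (P : List (Int × Int)) (pre : List Int) (d : PySem.Dict (Int × Int) Int) : Prop :=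
  (∀ k lx, d.get? k = some lx → k.1 < k.2 ∧ lx ∈ pre ∧ (lx, k.1) ∈ P ∧ (lx, k.2) ∈ P
      ∧ ∀ x' ∈ pre, (x', k.1) ∈ P → (x', k.2) ∈ P → x' ≤ lx)
  ∧ (∀ k : Int × Int, k.1 < k.2 → ∀ x' ∈ pre, (x', k.1) ∈ P → (x', k.2) ∈ P → ∃ lx, d.get? k = some lx)

-- loop invariant for the best accumulator: minimum over rectangles inside the processed columns
def pvINVb (P : List (Int × Int)) (pre : List Int) (b : Option Int) : Prop :=
  (b = none ↔ ∀ a, ¬ pvCR P pre a)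
  ∧ (∀ m, b = some m → pvCR P pre m ∧ ∀ a, pvCR P pre a → m ≤ a)

theorem pvCR_mono {P : List (Int × Int)} {pre : List Int} {x a : Int} (h : pvCR P pre a) :
    pvCR P (pre ++ [x]) a := by
  obtain ⟨x1, x2, y1, y2, h1, h2, rest⟩ := h
  exact ⟨x1, x2, y1, y2, List.mem_append_left _ h1, List.mem_append_left _ h2, rest⟩

theorem pvCR_append_iff {P : List (Int × Int)} {pre : List Int} {x : Int}
    (hpre : ∀ x' ∈ pre, x' < x) (a : Int) :
    pvCR P (pre ++ [x]) a ↔ pvCR P pre a ∨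
      ∃ x1 y1 y2, x1 ∈ pre ∧ y1 < y2 ∧ (x1, y1) ∈ P ∧ (x1, y2) ∈ P ∧ (x, y1) ∈ P ∧ (x, y2) ∈ P
        ∧ a = (x - x1) * (y2 - y1) := by
  constructor
  · rintro ⟨x1, x2, y1, y2, h1, h2, hx12, hy12, m11, m12, m21, m22, rfl⟩
    rcases List.mem_append.1 h2 with h2' | h2'
    · rcases List.mem_append.1 h1 with h1' | h1'
      · exact Or.inl ⟨x1, x2, y1, y2, h1', h2', hx12, hy12, m11, m12, m21, m22, rfl⟩
      · rw [List.mem_singleton.1 h1'] at hx12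
        exact absurd (lt_trans hx12 (hpre x2 h2')) (lt_irrefl _)
    · rw [List.mem_singleton.1 h2'] at m21 m22 ⊢
      rcases List.mem_append.1 h1 with h1' | h1'
      · exact Or.inr ⟨x1, y1, y2, h1', hy12, m11, m12, m21, m22, rfl⟩
      · rw [List.mem_singleton.1 h1'] at hx12
        rw [List.mem_singleton.1 h2'] at hx12
        exact absurd hx12 (lt_irrefl _)
  · rintro (h | ⟨x1, y1, y2, h1, hy12, m11, m12, m21, m22, rfl⟩)
    · exact pvCR_mono h
    · exact ⟨x1, x, y1, y2, List.mem_append_left _ h1,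
        List.mem_append_right _ (List.mem_singleton.2 rfl), hpre x1 h1, hy12, m11, m12, m21, m22, rfl⟩

theorem pvColStep (P : List (Int × Int)) (colf : Int → List Int)
    (hcolS : ∀ x, (colf x).Pairwise (· < ·)) (hcolM : ∀ x y, y ∈ colf x ↔ (x, y) ∈ P)
    (pre : List Int) (x : Int) (hpre : ∀ x' ∈ pre, x' < x)
    (b : Option Int) (d : PySem.Dict (Int × Int) Int)
    (hd : pvINVd P pre d) (hb : pvINVb P pre b) :
    pvINVd P (pre ++ [x]) (pvStepCol colf (b, d) x).2 ∧ pvINVb P (pre ++ [x]) (pvStepCol colf (b, d) x).1 := by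
  obtain ⟨hd1, hd2⟩ := hd
  obtain ⟨hb1, hb2⟩ := hb
  have hKmem : ∀ k : Int × Int, k ∈ pvPairs (colf x) ↔ (k.1 < k.2 ∧ (x, k.1) ∈ P ∧ (x, k.2) ∈ P) := by
    rintro ⟨a, c⟩
    rw [pvPairs_lt (hcolS x) a c]
    simp only [hcolM]
    tauto
  obtain ⟨f1, f2, f3⟩ := pvColFold x (pvPairs (colf x)) (pvPairs_nodup (hcolS x)) b d
  have hmemx : x ∈ pre ++ [x] := List.mem_append_right _ (List.mem_singleton.2 rfl)
  simp only [pvStepCol]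
  constructor
  · constructor
    · intro k lx hget
      rw [f1 k] at hget
      by_cases hkK : k ∈ pvPairs (colf x)
      · rw [if_pos hkK] at hget
        obtain ⟨hk12, hm1, hm2⟩ := (hKmem k).1 hkK
        have hlx : lx = x := (Option.some.inj hget).symm
        subst hlx
        refine ⟨hk12, hmemx, hm1, hm2, ?_⟩
        intro x' hx' _ _
        rcases List.mem_append.1 hx' with h | h
        · exact le_of_lt (hpre x' h)
        · exact le_of_eq (List.mem_singleton.1 h)
      · rw [if_neg hkK] at hget
        obtain ⟨hk12, hlxpre, hm1, hm2, hmax⟩ := hd1 k lx hget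
        refine ⟨hk12, List.mem_append_left _ hlxpre, hm1, hm2, ?_⟩
        intro x' hx' hp1 hp2
        rcases List.mem_append.1 hx' with h | h
        · exact hmax x' h hp1 hp2
        · rw [List.mem_singleton.1 h] at hp1 hp2
          exact absurd ((hKmem k).2 ⟨hk12, hp1, hp2⟩) hkK
    · intro k hk12 x' hx' hp1 hp2
      rcases List.mem_append.1 hx' with h | h
      · obtain ⟨lx, hlx⟩ := hd2 k hk12 x' h hp1 hp2
        rw [f1 k]
        by_cases hkK : k ∈ pvPairs (colf x)
        · exact ⟨x, by rw [if_pos hkK]⟩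
        · exact ⟨lx, by rw [if_neg hkK]; exact hlx⟩
      · rw [List.mem_singleton.1 h] at hp1 hp2
        have hkK : k ∈ pvPairs (colf x) := (hKmem k).2 ⟨hk12, hp1, hp2⟩
        exact ⟨x, by rw [f1 k, if_pos hkK]⟩
  · constructor
    · rw [f2]
      constructor
      · rintro ⟨hbn, hcand⟩ a ha
        rcases (pvCR_append_iff hpre a).1 ha with h | ⟨x1, y1, y2, h1, hy12, m11, m12, m21, m22, rfl⟩
        · exact (hb1.1 hbn) a h
        · have hkK : ((y1, y2) : Int × Int) ∈ pvPairs (colf x) := (hKmem (y1, y2)).2 ⟨hy12, m21, m22⟩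
          obtain ⟨lx, hlx⟩ := hd2 (y1, y2) hy12 x1 h1 m11 m12
          rw [hcand (y1, y2) hkK] at hlx
          exact absurd hlx (by simp)
      · intro hnone
        refine ⟨hb1.2 (fun a ha => hnone a (pvCR_mono ha)), ?_⟩
        intro k hkK
        rcases hget : d.get? k with _ | lx
        · rfl
        · obtain ⟨hk12, hlxpre, hm1, hm2, -⟩ := hd1 k lx hget
          obtain ⟨-, hp1, hp2⟩ := (hKmem k).1 hkK
          exact absurd (((pvCR_append_iff hpre _).2 (Or.inr
            ⟨lx, k.1, k.2, hlxpre, hk12, hm1, hm2, hp1, hp2, rfl⟩))) (hnone _)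
    · intro m hm
      obtain ⟨hach, hlbb, hallk⟩ := f3 m hm
      constructor
      · rcases hach with h | ⟨k, hkK, lx, hget, rfl⟩
        · exact pvCR_mono (hb2 m h).1
        · obtain ⟨hk12, hlxpre, hm1, hm2, -⟩ := hd1 k lx hget
          obtain ⟨-, hp1, hp2⟩ := (hKmem k).1 hkK
          exact (pvCR_append_iff hpre _).2 (Or.inr ⟨lx, k.1, k.2, hlxpre, hk12, hm1, hm2, hp1, hp2, rfl⟩)
      · intro a ha
        rcases (pvCR_append_iff hpre a).1 ha with h | ⟨x1, y1, y2, h1, hy12, m11, m12, m21, m22, rfl⟩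
        · rcases hbe : b with _ | v
          · exact absurd h ((hb1.1 hbe) a)
          · exact le_trans (hlbb v hbe) ((hb2 v hbe).2 a h)
        · have hkK : ((y1, y2) : Int × Int) ∈ pvPairs (colf x) := (hKmem (y1, y2)).2 ⟨hy12, m21, m22⟩
          obtain ⟨lx, hget⟩ := hd2 (y1, y2) hy12 x1 h1 m11 m12
          obtain ⟨-, -, -, -, hmax⟩ := hd1 (y1, y2) lx hget
          have hx1lx : x1 ≤ lx := hmax x1 h1 m11 m12
          have hstep : m ≤ (x - lx) * (y2 - y1) := hallk (y1, y2) hkK lx hget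
          refine le_trans hstep (mul_le_mul_of_nonneg_right (by omega) (by omega))

theorem pvOuterInv (P : List (Int × Int)) (colf : Int → List Int)
    (hcolS : ∀ x, (colf x).Pairwise (· < ·)) (hcolM : ∀ x y, y ∈ colf x ↔ (x, y) ∈ P) :
    ∀ (rest pre : List Int) (b : Option Int) (d : PySem.Dict (Int × Int) Int),
      (pre ++ rest).Pairwise (· < ·) →
      pvINVd P pre d → pvINVb P pre b →
      pvINVb P (pre ++ rest) (rest.foldl (pvStepCol colf) (b, d)).1 := by
  intro rest
  induction rest with
  | nil => intro pre b d _ _ hb; simpa using hb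
  | cons x rest' ih =>
    intro pre b d hsort hd hb
    have hpre : ∀ x' ∈ pre, x' < x := by
      intro x' hx'
      have := List.pairwise_append.1 hsort
      exact this.2.2 x' hx' x List.mem_cons_self
    obtain ⟨hd', hb'⟩ := pvColStep P colf hcolS hcolM pre x hpre b d hd hb
    rw [List.foldl_cons]
    have hassoc : pre ++ x :: rest' = (pre ++ [x]) ++ rest' := by simp
    rw [hassoc]
    have hsort' : ((pre ++ [x]) ++ rest').Pairwise (· < ·) := by rw [← hassoc]; exact hsort
    have := ih (pre ++ [x]) (pvStepCol colf (b, d) x).1 (pvStepCol colf (b, d) x).2 hsort' hd' hb'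
    simpa using this

theorem pvCR_xs_iff (P : List (Int × Int)) (xs : List Int)
    (hxs : ∀ x, x ∈ xs ↔ ∃ y, (x, y) ∈ P) (a : Int) :
    pvCR P xs a ↔ pvRect P a := by
  constructor
  · rintro ⟨x1, x2, y1, y2, -, -, hx12, hy12, m11, m12, m21, m22, rfl⟩
    refine ⟨(x1, y1), (x2, y2), m11, m22, ne_of_lt hx12, ne_of_lt hy12, m12, m21, ?_⟩
    rw [abs_of_nonneg (mul_nonneg (by omega) (by omega))]
  · rintro ⟨q, r, hq, hr, hx, hy, hm1, hm2, rfl⟩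
    have hq' : (q.1, q.2) ∈ P := by simpa using hq
    have hr' : (r.1, r.2) ∈ P := by simpa using hr
    rcases lt_or_gt_of_ne hx with hx' | hx' <;> rcases lt_or_gt_of_ne hy with hy' | hy'
    · refine ⟨q.1, r.1, q.2, r.2, (hxs q.1).2 ⟨q.2, hq'⟩, (hxs r.1).2 ⟨r.2, hr'⟩,
        hx', hy', hq', hm1, hm2, hr', ?_⟩
      rw [abs_of_nonneg (mul_nonneg (by omega) (by omega))]
    · refine ⟨q.1, r.1, r.2, q.2, (hxs q.1).2 ⟨q.2, hq'⟩, (hxs r.1).2 ⟨r.2, hr'⟩,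
        hx', hy', hm1, hq', hr', hm2, ?_⟩
      rw [abs_of_nonpos (mul_nonpos_of_nonneg_of_nonpos (by omega) (by omega))]
      ring
    · refine ⟨r.1, q.1, q.2, r.2, (hxs r.1).2 ⟨r.2, hr'⟩, (hxs q.1).2 ⟨q.2, hq'⟩,
        hx', hy', hm2, hr', hq', hm1, ?_⟩
      rw [abs_of_nonpos (mul_nonpos_of_nonpos_of_nonneg (by omega) (by omega))]
      ring
    · refine ⟨r.1, q.1, r.2, q.2, (hxs r.1).2 ⟨r.2, hr'⟩, (hxs q.1).2 ⟨q.2, hq'⟩,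
        hx', hy', hr', hm2, hm1, hq', ?_⟩
      rw [abs_of_nonneg (by nlinarith : (0:Int) ≤ (r.1 - q.1) * (r.2 - q.2))]
      ring

theorem pvB_isMin0 (points : List (List Int)) (h4 : ¬ points.length < 4) :
    pvIsMin0 (pvRect (pvP points)) (minimum_area_rectangle_alt points) := by
  have hcols : (points.foldl (fun d p => d.modify (pvXY p).1 PySem.Set.empty (fun s => PySem.Set.add s (pvXY p).2)) PySem.Dict.empty)
      = pvCols points := rfl
  have hcolS : ∀ x, (PySem.List.sorted ((pvCols points).getD x PySem.Set.empty) (fun y => y) false).Pairwise (· < ·) := by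
    intro x
    refine pvPairwise_lt_of_le_nodup ?_ ?_
    · exact PySem.List.sorted_pairwise _ _
    · exact ((PySem.List.sorted_perm _ _ _).nodup_iff).2 (pvCols_getD_nodup points x)
  have hcolM : ∀ x y, y ∈ PySem.List.sorted ((pvCols points).getD x PySem.Set.empty) (fun y => y) false ↔ (x, y) ∈ pvP points := by
    intro x y
    rw [PySem.List.mem_sorted, pvCols_getD_mem]
  have hxsS : (PySem.List.sorted (pvCols points).keys (fun k => k) false).Pairwise (· < ·) := by
    refine pvPairwise_lt_of_le_nodup ?_ ?_
    · exact PySem.List.sorted_pairwise _ _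
    · exact ((PySem.List.sorted_perm _ _ _).nodup_iff).2 (pvCols_keys_nodup points)
  have hxsM : ∀ x, x ∈ PySem.List.sorted (pvCols points).keys (fun k => k) false ↔ ∃ y, (x, y) ∈ pvP points := by
    intro x
    rw [PySem.List.mem_sorted, pvCols_keys_mem]
  simp only [minimum_area_rectangle_alt, if_neg h4, hcols]
  -- rewrite each column's double index loop into a fold of pvG over the column's pair list
  have hloop : ∀ (x : Int) (ys : List Int) (s : Option Int × PySem.Dict (Int × Int) Int),
      pvColLoop x ys s = (pvPairs ys).foldl (pvG x) s := by
    intro x ys s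
    unfold pvColLoop
    rw [pvDouble_pair_fold (F := pvF x) (d := (0 : Int))]
    have he : (fun (s : Option Int × PySem.Dict (Int × Int) Int) (k : Int × Int) => pvF x s k.1 k.2) = pvG x := by
      funext s k
      cases k
      rfl
    rw [he]
  have hbody := PySem.List.foldl_congr_mem (PySem.List.sorted (pvCols points).keys (fun k => k) false)
    (fun (s : Option Int × PySem.Dict (Int × Int) Int) (x : Int) =>
      pvColLoop x (PySem.List.sorted ((pvCols points).getD x PySem.Set.empty) (fun y => y) false) s)
    (pvStepCol (fun x => PySem.List.sorted ((pvCols points).getD x PySem.Set.empty) (fun y => y) false))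
    ((none : Option Int), (PySem.Dict.empty : PySem.Dict (Int × Int) Int))
    (fun s x _ => by dsimp only; rw [hloop]; rfl)
  rw [hbody]
  have hinv := pvOuterInv (pvP points)
    (fun x => PySem.List.sorted ((pvCols points).getD x PySem.Set.empty) (fun y => y) false)
    hcolS hcolM
    (PySem.List.sorted (pvCols points).keys (fun k => k) false) [] none PySem.Dict.empty
    (by simpa using hxsS)
    ⟨fun k lx h => absurd h (by simp), fun k _ x' hx' => absurd hx' (List.not_mem_nil)⟩
    ⟨⟨fun _ a => by rintro ⟨x1, x2, y1, y2, h1, -⟩; exact absurd h1 (List.not_mem_nil),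
      fun _ => rfl⟩,
     fun m hm => absurd hm (by simp)⟩
  simp only [List.nil_append] at hinv
  obtain ⟨hi1, hi2⟩ := hinv
  rcases hres : ((PySem.List.sorted (pvCols points).keys (fun k => k) false).foldl
      (pvStepCol (fun x => PySem.List.sorted ((pvCols points).getD x PySem.Set.empty) (fun y => y) false))
      ((none : Option Int), (PySem.Dict.empty : PySem.Dict (Int × Int) Int))).1 with _ | m
  · have hempty := hi1.1 hres
    exact Or.inl ⟨rfl, fun a ha =>
      hempty a ((pvCR_xs_iff (pvP points) _ hxsM a).2 ha)⟩
  · obtain ⟨hcr, hlb⟩ := hi2 m hres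
    exact Or.inr ⟨(pvCR_xs_iff (pvP points) _ hxsM m).1 hcr,
      fun a ha => hlb a ((pvCR_xs_iff (pvP points) _ hxsM a).2 ha)⟩

-- ===== VERDICT (by name: the statement is the Claim_ definition above) =====
theorem minimum_area_rectangle_spec : Claim_equal_minimum_area_rectangle := by
  intro points _ _
  unfold Spec_minimum_area_rectangle
  by_cases h4 : points.length < 4
  · simp only [minimum_area_rectangle, minimum_area_rectangle_alt, if_pos h4]
  · exact pvIsMin0_unique (pvA_isMin0 points h4) (pvB_isMin0 points h4)
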